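-- pv_equiv track=rewrite | github.com/rsprenkels/kattis | python/1_7/kafkaesque.py | kafkaesque
-- ===== SOURCE A (Python) =====
-- from typing import Sequence
--
-- def kafkaesque(signatures: Sequence[int]) -> int:
--     passes = 0
--     while len(signatures) > 0:
--         passes += 1
--         last_popped = signatures.pop(0)
--         while len(signatures) > 0 and signatures[0] > last_popped:
--             last_popped = signatures.pop(0)
--     return passes
-- ===== SOURCE B (Python) =====
-- def kafkaesque(signatures):
--     if not signatures:
--         return 0
--     return 1 + sum(b <= a for a, b in zip(signatures, signatures[1:]))
-- ===== Notes on version B (the rewrite author's own statement) =====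
-- stated objective: faster
-- what changed: Replaces the destructive pop(0)-driven nested while loops with a single linear zip scan counting non-increasing adjacent pairs plus one (note: A empties the input list in place; B does not mutate it).
import Mathlib
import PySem

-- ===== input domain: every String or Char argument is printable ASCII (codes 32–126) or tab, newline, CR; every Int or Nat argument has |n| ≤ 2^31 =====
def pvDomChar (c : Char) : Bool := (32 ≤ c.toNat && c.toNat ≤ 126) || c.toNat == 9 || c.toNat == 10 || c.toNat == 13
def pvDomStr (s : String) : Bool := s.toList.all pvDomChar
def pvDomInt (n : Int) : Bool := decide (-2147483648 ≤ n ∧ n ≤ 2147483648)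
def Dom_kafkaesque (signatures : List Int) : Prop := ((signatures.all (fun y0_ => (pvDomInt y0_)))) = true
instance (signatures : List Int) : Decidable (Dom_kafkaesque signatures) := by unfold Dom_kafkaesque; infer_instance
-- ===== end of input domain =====

-- B replaces A's destructive pop(0) nested-while scan (O(n^2)) by one linear zip pass
-- counting non-increasing adjacent pairs plus one; equivalence is about the RETURN value
-- only — Python A empties its argument list in place, B does not mutate it.


-- ===== PORT A =====
-- inner while: pop(0) while the head is greater than last_popped
def kafkaesqueDropRun (last : Int) : List Int → List Int
  | [] => []
  | y :: ys => if y > last then kafkaesqueDropRun y ys else y :: ys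

theorem kafkaesqueDropRun_length_le (last : Int) (xs : List Int) :
    (kafkaesqueDropRun last xs).length ≤ xs.length := by
  induction xs generalizing last with
  | nil => simp [kafkaesqueDropRun]
  | cons y ys ih =>
    simp only [kafkaesqueDropRun]
    split
    · exact Nat.le_trans (ih y) (Nat.le_succ _)
    · simp

-- outer while: one pass per iteration
def kafkaesque (signatures : List Int) : Int :=
  match signatures with
  | [] => 0
  | x :: xs => 1 + kafkaesque (kafkaesqueDropRun x xs)
termination_by signatures.length
decreasing_by
  exact Nat.lt_succ_of_le (kafkaesqueDropRun_length_le x xs)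

-- ===== PORT B =====
def kafkaesque_alt (signatures : List Int) : Int :=
  match signatures with
  | [] => 0
  | _ :: _ =>
      1 + (signatures.zip signatures.tail).foldl
            (fun acc p => acc + (if p.2 ≤ p.1 then 1 else 0)) 0

-- ===== PRECONDITION & SPEC =====
def Spec_kafkaesque (signatures : List Int) (out : Int) : Prop := out = kafkaesque_alt signatures
instance (signatures : List Int) (out : Int) : Decidable (Spec_kafkaesque signatures out) := by unfold Spec_kafkaesque; infer_instance

-- ===== CLAIM (what is proved, stated in full; the proofs are below) =====
def Claim_equal_kafkaesque : Prop := ∀ (signatures : List Int), Dom_kafkaesque signatures → Spec_kafkaesque signatures (kafkaesque signatures)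

-- ===== LEMMAS AND PROOFS =====
-- number of non-increasing breaks after a given previous element
def kafBrk (last : Int) : List Int → Int
  | [] => 0
  | y :: ys => (if y ≤ last then 1 else 0) + kafBrk y ys

theorem kafBrk_foldl (l : List Int) (last : Int) (acc : Int) :
    ((last :: l).zip l).foldl (fun acc p => acc + (if p.2 ≤ p.1 then 1 else 0)) acc
      = acc + kafBrk last l := by
  induction l generalizing last acc with
  | nil => simp [kafBrk]
  | cons y ys ih =>
    simp only [List.zip_cons_cons, List.foldl_cons, kafBrk, ih]
    ring

theorem kafkaesque_dropRun_eq (xs : List Int) (last : Int) :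
    kafkaesque (kafkaesqueDropRun last xs) = kafBrk last xs := by
  induction xs generalizing last with
  | nil => simp [kafkaesqueDropRun, kafkaesque, kafBrk]
  | cons y ys ih =>
    simp only [kafkaesqueDropRun, kafBrk]
    split
    · rename_i h
      rw [ih y, if_neg (by omega)]
      ring
    · rename_i h
      rw [kafkaesque, ih y, if_pos (by omega)]

-- ===== VERDICT (by name: the statement is the Claim_ definition above) =====
theorem kafkaesque_spec : Claim_equal_kafkaesque := by
  intro signatures _
  unfold Spec_kafkaesque
  match signatures with
  | [] =>
    show kafkaesque [] = kafkaesque_alt []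
    rw [kafkaesque, kafkaesque_alt]
  | x :: xs =>
    show kafkaesque (x :: xs) = kafkaesque_alt (x :: xs)
    rw [kafkaesque, kafkaesque_alt]
    simp only [List.tail_cons]
    rw [kafBrk_foldl xs x 0, kafkaesque_dropRun_eq, zero_add]
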